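-- pv_equiv track=rewrite | github.com/westandskif/convtools | build-docs-reducers.py | split_reducers
-- ===== SOURCE A (Python) =====
-- def split_reducers(reducers):
--     value_reducers = []
--     dict_reducers = []
--     for name, description in reducers:
--         if name.startswith("Dict"):
--             dict_reducers.append((name, description))
--         else:
--             value_reducers.append((name, description))
--     return sorted(value_reducers), sorted(dict_reducers)
-- ===== SOURCE B (Python) =====
-- def split_reducers(reducers):
--     value_reducers = []
--     dict_reducers = []
--     for pair in reducers:
--         target = dict_reducers if pair[0].startswith("Dict") else value_reducers
--         i = 0
--         while i < len(target) and target[i] <= pair: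
--             i += 1
--         target.insert(i, pair)
--     return value_reducers, dict_reducers
-- ===== Notes on version B (the rewrite author's own statement) =====
-- stated objective: alternative
-- what changed: A partitions in one pass and then calls sort on each partition; B never sorts: in a single online pass it keeps both partitions sorted at all times by scanning for the insertion point and inserting each pair there (incremental insertion sort per partition).
import Mathlib
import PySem

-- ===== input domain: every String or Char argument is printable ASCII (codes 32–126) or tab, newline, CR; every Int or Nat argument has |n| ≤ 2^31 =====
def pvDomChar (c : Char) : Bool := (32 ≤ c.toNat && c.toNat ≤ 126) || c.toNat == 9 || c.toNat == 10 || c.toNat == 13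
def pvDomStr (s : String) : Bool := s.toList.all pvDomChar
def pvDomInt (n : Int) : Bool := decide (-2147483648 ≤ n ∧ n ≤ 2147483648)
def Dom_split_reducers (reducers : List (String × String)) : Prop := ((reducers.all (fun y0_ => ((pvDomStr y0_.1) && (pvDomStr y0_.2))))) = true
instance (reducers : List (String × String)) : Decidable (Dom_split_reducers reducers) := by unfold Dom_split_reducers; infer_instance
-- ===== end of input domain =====

-- B replaces A's partition-then-sort-each with a single pass that keeps both partitions sorted at all times by scanning for each pair's insertion point (incremental insertion sort; no sort call).


-- ===== PORT A =====
-- A: one loop partitions the input into value/dict lists, then each list is sorted.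
def split_reducers (reducers : List (String × String)) : (List (String × String)) × (List (String × String)) :=
  let r := reducers.foldl
    (fun (acc : List (String × String) × List (String × String)) x =>
      if PySem.Str.startswith x.1 "Dict" then (acc.1, acc.2 ++ [x]) else (acc.1 ++ [x], acc.2))
    ([], [])
  (PySem.List.sorted2 r.1 Prod.fst Prod.snd false, PySem.List.sorted2 r.2 Prod.fst Prod.snd false)

-- ===== PORT B =====
-- Python's tuple comparison target[i] <= pair, lexicographic on the two string components (exact on Dom's ASCII strings)
def pvLeP (a b : String × String) : Bool :=
  decide (a.1 < b.1) || (decide (a.1 = b.1) && decide (a.2 ≤ b.2))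

-- the while-loop scan + target.insert(i, pair): walk past elements ≤ pair, insert there
def pvInsert (x : String × String) : List (String × String) → List (String × String)
  | [] => [x]
  | y :: ys => if pvLeP y x then y :: pvInsert x ys else x :: y :: ys

-- B: single pass; each pair is inserted at its sorted position in the chosen partition.
def split_reducers_alt (reducers : List (String × String)) : (List (String × String)) × (List (String × String)) :=
  reducers.foldl
    (fun (acc : List (String × String) × List (String × String)) x =>
      if PySem.Str.startswith x.1 "Dict" then (acc.1, pvInsert x acc.2) else (pvInsert x acc.1, acc.2))
    ([], [])

-- ===== PRECONDITION & SPEC =====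
def Spec_split_reducers (reducers : List (String × String)) (out : (List (String × String)) × (List (String × String))) : Prop := out = split_reducers_alt reducers
instance (reducers : List (String × String)) (out : (List (String × String)) × (List (String × String))) : Decidable (Spec_split_reducers reducers out) := by unfold Spec_split_reducers; infer_instance

-- ===== CLAIM (what is proved, stated in full; the proofs are below) =====
def Claim_equal_split_reducers : Prop := ∀ (reducers : List (String × String)), Dom_split_reducers reducers → Spec_split_reducers reducers (split_reducers reducers)

-- ===== LEMMAS AND PROOFS =====

-- the strict lexicographic comparison sorted2 uses on pairs (proof-side only)
def pvLt (a b : String × String) : Bool :=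
  decide (a.1 < b.1) || (!decide (b.1 < a.1) && decide (a.2 < b.2))

-- B's non-strict test is the negation of sorted2's strict test
theorem pvLeP_eq_not_pvLt (a b : String × String) : pvLeP a b = !pvLt b a := by
  simp only [pvLeP, pvLt, Bool.not_or, Bool.not_and, Bool.not_not]
  rcases lt_trichotomy a.1 b.1 with h | h | h
  · simp [h, not_lt_of_gt h, ne_of_lt h]
  · by_cases h2 : a.2 ≤ b.2
    · simp [h, h2, not_lt.mpr h2]
    · simp [h, h2, not_le.mp h2]
  · simp [h, not_lt_of_gt h, ne_of_gt h]

-- B's scan-and-insert is exactly the insertion step of sorted2's insertion sort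
theorem pvInsert_eq_insertBy (x : String × String) (ys : List (String × String)) :
    pvInsert x ys = PySem.List.insertBy pvLt x ys := by
  induction ys with
  | nil => rfl
  | cons y ys ih =>
    rw [pvInsert, PySem.List.insertBy, pvLeP_eq_not_pvLt]
    cases h : pvLt x y <;> simp [ih]

-- B's single pass, characterised: each partition is the insertion-sort fold of its filter
theorem alt_loop (xs : List (String × String)) (v d : List (String × String)) :
    xs.foldl
      (fun (acc : List (String × String) × List (String × String)) x =>
        if PySem.Str.startswith x.1 "Dict" then (acc.1, pvInsert x acc.2) else (pvInsert x acc.1, acc.2))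
      (v, d)
      = ((xs.filter (fun x => !PySem.Str.startswith x.1 "Dict")).foldl
           (fun acc x => PySem.List.insertBy pvLt x acc) v,
         (xs.filter (fun x => PySem.Str.startswith x.1 "Dict")).foldl
           (fun acc x => PySem.List.insertBy pvLt x acc) d) := by
  induction xs generalizing v d with
  | nil => simp
  | cons x xs ih =>
    simp only [List.foldl_cons, List.filter_cons]
    by_cases h : PySem.Str.startswith x.1 "Dict" = true
    · rw [if_pos h, ih, h, pvInsert_eq_insertBy]
      simp
    · rw [if_neg h, ih, Bool.eq_false_iff.mpr h, pvInsert_eq_insertBy]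
      simp

-- sorted2 with the (fst, snd) tuple key IS that insertion-sort fold (definitional)
theorem sorted2_eq_foldl (xs : List (String × String)) :
    PySem.List.sorted2 xs Prod.fst Prod.snd false
      = xs.foldl (fun acc x => PySem.List.insertBy pvLt x acc) [] := rfl

-- A's partition loop, characterised as two filters
theorem partition_loop (xs : List (String × String))
    (v d : List (String × String)) :
    xs.foldl
      (fun (acc : List (String × String) × List (String × String)) x =>
        if PySem.Str.startswith x.1 "Dict" then (acc.1, acc.2 ++ [x]) else (acc.1 ++ [x], acc.2))
      (v, d)
      = (v ++ xs.filter (fun x => !PySem.Str.startswith x.1 "Dict"),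
         d ++ xs.filter (fun x => PySem.Str.startswith x.1 "Dict")) := by
  induction xs generalizing v d with
  | nil => simp
  | cons x xs ih =>
    simp only [List.foldl_cons, List.filter_cons]
    by_cases h : PySem.Str.startswith x.1 "Dict" = true
    · rw [if_pos h, ih, h]
      simp
    · rw [if_neg h, ih, Bool.eq_false_iff.mpr h]
      simp

-- ===== VERDICT (by name: the statement is the Claim_ definition above) =====
theorem split_reducers_spec : Claim_equal_split_reducers := by
  intro reducers _
  unfold Spec_split_reducers split_reducers split_reducers_alt
  rw [partition_loop, alt_loop]
  simp only [List.nil_append]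
  rw [sorted2_eq_foldl, sorted2_eq_foldl]
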